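-- pv_equiv track=rewrite | github.com/dariuusz/python-programming_tasks | linkedlist.py | middle_element
-- ===== SOURCE A (Python) =====
-- def middle_element(dictionary):
--     """(dictionary) --> list
--     Convert dictionary' objects into iterator. Return the middle
--     object of passed dictionary. Function return 1 or 2
--     elements in a list whether is even or odd.
--     >>> middle_element('a': [1, 2], 'b': [1], 'c': [1, 2])
--     ('b', [1])
--     >>> middle_element('a': [1, 2], 'b': [1], 'c': [1, 2], 'd': [1])
--     [('b', [1]), ('c', [ 1, 2])]
--     """
--     items = iter(dictionary.items())
--     dic_length = dictionary_length(dictionary)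
--     middle_elements = []
--     count = 0
--     for i in items:
--         count += 1
--         if count == dic_length[0] or count == dic_length[1]:
--             middle_elements.append(i)
--     return middle_elements
--
-- def dictionary_length(dictionary):
--     """(dictionary) --> list
--     Return a length of dictionary.
--     >>> dictionary_length('a': [1, 2], 'b': [1], 'c': [1, 2])
--     [ 1 , 0 ]
--     >>> dictionary_length('a': [1, 2], 'b': [1], 'c': [1, 2], 'd': [1])
--     [ 2 , 3 ]
--     """
--
--     dict_length = len(dictionary)
--     if dict_length % 2 == 0:
--         return [dict_length // 2, dict_length // 2 + 1]
--     else: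
--         return [dict_length // 2, 0]
-- ===== SOURCE B (Python) =====
-- def middle_element(dictionary):
--     items = list(dictionary.items())
--     n = len(items)
--     h = n // 2
--     if n % 2 == 0:
--         return items[h - 1:h + 1]
--     else:
--         return items[h - 1:h]
-- ===== Notes on version B (the rewrite author's own statement) =====
-- stated objective: simpler
-- what changed: B replaces A's counter loop plus the dictionary_length helper with a direct slice of the materialized items list (items[n//2-1:n//2+1] for even n, items[n//2-1:n//2] for odd n), which yields the same elements including the empty result for n<=1 via slice clamping.
import Mathlib
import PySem

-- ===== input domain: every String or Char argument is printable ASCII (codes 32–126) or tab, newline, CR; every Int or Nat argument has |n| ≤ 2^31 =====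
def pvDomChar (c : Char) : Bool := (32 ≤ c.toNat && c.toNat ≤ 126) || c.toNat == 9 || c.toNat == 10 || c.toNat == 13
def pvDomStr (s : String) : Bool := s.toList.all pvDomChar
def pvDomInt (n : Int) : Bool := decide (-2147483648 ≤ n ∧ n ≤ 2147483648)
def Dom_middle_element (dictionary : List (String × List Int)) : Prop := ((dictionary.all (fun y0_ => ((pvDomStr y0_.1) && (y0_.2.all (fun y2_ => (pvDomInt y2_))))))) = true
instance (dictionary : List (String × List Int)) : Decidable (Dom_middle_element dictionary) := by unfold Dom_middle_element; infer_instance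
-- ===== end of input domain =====

-- B replaces A's counter loop plus the dictionary_length helper with a direct slice
-- of the materialized items list; same result, a simpler decomposition.

-- ===== PORT A =====
-- helper dictionary_length, transliterated
def dictionary_length (dictionary : List (String × List Int)) : List Int :=
  let dict_length : Int := dictionary.length
  if PySem.Int.mod dict_length 2 = 0 then
    [PySem.Int.floordiv dict_length 2, PySem.Int.floordiv dict_length 2 + 1]
  else
    [PySem.Int.floordiv dict_length 2, 0]

def middle_element (dictionary : List (String × List Int)) : List (String × List Int) :=
  let dic_length := dictionary_length dictionary
  -- dic_length[0] / dic_length[1]: the helper always returns a 2-element list, so the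
  -- Python indexing never raises; .getD 0 only discharges the Option.
  let t0 : Int := (PySem.List.pyGet? dic_length 0).getD 0
  let t1 : Int := (PySem.List.pyGet? dic_length 1).getD 0
  (dictionary.foldl
    (fun (st : Int × List (String × List Int)) i =>
      let count := st.1 + 1
      (count, if count = t0 ∨ count = t1 then st.2 ++ [i] else st.2))
    (0, [])).2

-- ===== PORT B =====
def middle_element_alt (dictionary : List (String × List Int)) : List (String × List Int) :=
  let n : Int := dictionary.length
  let h : Int := PySem.Int.floordiv n 2
  if PySem.Int.mod n 2 = 0 then
    PySem.List.slice dictionary (some (h - 1)) (some (h + 1))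
  else
    PySem.List.slice dictionary (some (h - 1)) (some h)

-- ===== PRECONDITION & SPEC =====
def Spec_middle_element (dictionary : List (String × List Int)) (out : List (String × List Int)) : Prop := out = middle_element_alt dictionary
instance (dictionary : List (String × List Int)) (out : List (String × List Int)) : Decidable (Spec_middle_element dictionary out) := by unfold Spec_middle_element; infer_instance

-- ===== CLAIM (what is proved, stated in full; the proofs are below) =====
def Claim_equal_middle_element : Prop := ∀ (dictionary : List (String × List Int)), Dom_middle_element dictionary → Spec_middle_element dictionary (middle_element dictionary)

-- ===== LEMMAS AND PROOFS =====

-- pvSel l a b keeps the elements at 1-based positions a and b (in list order).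
def pvSel {α : Type} : List α → Int → Int → List α
  | [], _, _ => []
  | x :: xs, a, b => (if a = 1 ∨ b = 1 then [x] else []) ++ pvSel xs (a - 1) (b - 1)

-- pvPick l a keeps the element at 1-based position a.
def pvPick {α : Type} : List α → Int → List α
  | [], _ => []
  | x :: xs, a => (if a = 1 then [x] else []) ++ pvPick xs (a - 1)

theorem pvPick_nonpos {α : Type} (l : List α) (a : Int) (ha : a ≤ 0) : pvPick l a = [] := by
  induction l generalizing a with
  | nil => rfl
  | cons x xs ih =>
    simp only [pvPick]
    rw [if_neg (by omega), ih (a - 1) (by omega)]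
    rfl

theorem pvSel_right_nonpos {α : Type} (l : List α) (a b : Int) (hb : b ≤ 0) :
    pvSel l a b = pvPick l a := by
  induction l generalizing a b with
  | nil => rfl
  | cons x xs ih =>
    simp only [pvSel, pvPick]
    rw [ih (a - 1) (b - 1) (by omega)]
    congr 1
    by_cases h : a = 1
    · rw [if_pos (Or.inl h), if_pos h]
    · rw [if_neg (by omega), if_neg h]

theorem pvSel_left_nonpos {α : Type} (l : List α) (a b : Int) (ha : a ≤ 0) :
    pvSel l a b = pvPick l b := by
  induction l generalizing a b with
  | nil => rfl
  | cons x xs ih =>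
    simp only [pvSel, pvPick]
    rw [ih (a - 1) (b - 1) (by omega)]
    congr 1
    by_cases h : b = 1
    · rw [if_pos (Or.inr h), if_pos h]
    · rw [if_neg (by omega), if_neg h]

theorem pvSel_lt {α : Type} (l : List α) (a b : Int) (hab : a < b) :
    pvSel l a b = pvPick l a ++ pvPick l b := by
  induction l generalizing a b with
  | nil => rfl
  | cons x xs ih =>
    simp only [pvSel, pvPick]
    by_cases ha : a = 1
    · have hb : b ≠ 1 := by omega
      rw [if_pos (Or.inl ha), if_pos ha, if_neg hb,
        pvSel_left_nonpos xs (a - 1) (b - 1) (by omega),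
        pvPick_nonpos xs (a - 1) (by omega)]
      simp
    · by_cases hb : b = 1
      · rw [if_pos (Or.inr hb), if_neg ha, if_pos hb,
          pvSel_right_nonpos xs (a - 1) (b - 1) (by omega),
          pvPick_nonpos xs (a - 1) (by omega)]
        simp [pvPick_nonpos xs (b - 1) (by omega : b - 1 ≤ 0)]
      · rw [if_neg (by omega), if_neg ha, if_neg hb, ih (a - 1) (b - 1) (by omega)]
        simp

-- the element at 0-based index i, as a pick at 1-based position i+1
theorem pvPick_eq {α : Type} (l : List α) (i : Nat) (h : i < l.length) :
    pvPick l ((i : Int) + 1) = [l[i]] := by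
  induction l generalizing i with
  | nil => simp at h
  | cons x xs ih =>
    cases i with
    | zero => simp [pvPick, pvPick_nonpos xs 0 le_rfl]
    | succ j =>
      simp only [pvPick]
      rw [if_neg (by push_cast; omega)]
      have e : ((j + 1 : Nat) : Int) + 1 - 1 = (j : Int) + 1 := by push_cast; ring
      rw [e, ih j (by simpa using h)]
      simp

-- A's counter loop computes exactly pvSel (positions relative to the running count)
theorem fold_eq (l : List (String × List Int)) (c : Int) (acc : List (String × List Int))
    (a b : Int) :
    (l.foldl
      (fun (st : Int × List (String × List Int)) i =>
        let count := st.1 + 1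
        (count, if count = a ∨ count = b then st.2 ++ [i] else st.2))
      (c, acc)).2 = acc ++ pvSel l (a - c) (b - c) := by
  induction l generalizing c acc with
  | nil => simp [pvSel]
  | cons x xs ih =>
    simp only [List.foldl_cons]
    rw [ih]
    simp only [pvSel]
    have e1 : a - (c + 1) = a - c - 1 := by ring
    have e2 : b - (c + 1) = b - c - 1 := by ring
    rw [e1, e2]
    by_cases h : c + 1 = a ∨ c + 1 = b
    · rw [if_pos h, if_pos (by omega)]; simp
    · rw [if_neg h, if_neg (by omega)]; simp

theorem drop_take_one {α : Type} (l : List α) (i : Nat) (h : i < l.length) :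
    (l.drop i).take 1 = [l[i]] := by
  induction l generalizing i with
  | nil => simp at h
  | cons x xs ih =>
    cases i with
    | zero => simp
    | succ j => simpa using ih j (by simpa using h)

theorem drop_take_two {α : Type} (l : List α) (i : Nat) (h : i + 1 < l.length) :
    (l.drop i).take 2 = [l[i], l[i + 1]] := by
  induction l generalizing i with
  | nil => simp at h
  | cons x xs ih =>
    cases i with
    | zero => simpa using drop_take_one xs 0 (by simpa using h)
    | succ j => simpa using ih j (by simpa using h)

theorem middle_element_spec : Claim_equal_middle_element := by
  intro d _
  show middle_element d = middle_element_alt d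
  have hf : PySem.Int.floordiv (d.length : Int) 2 = ((d.length / 2 : Nat) : Int) := by
    rw [PySem.Int.floordiv_eq_ediv_of_pos (by norm_num)]
    omega
  have hm : PySem.Int.mod (d.length : Int) 2 = ((d.length % 2 : Nat) : Int) := by
    rw [PySem.Int.mod_eq_emod_of_pos (by norm_num)]
    omega
  by_cases hpar : d.length % 2 = 0
  · -- even length
    have hm0 : PySem.Int.mod (d.length : Int) 2 = 0 := by rw [hm, hpar]; simp
    have hA : middle_element d =
        pvSel d ((d.length / 2 : Nat) : Int) (((d.length / 2 : Nat) : Int) + 1) := by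
      unfold middle_element dictionary_length
      simp only [hm0, hf, PySem.List.pyGet?, PySem.List.pyIdx?]
      rw [fold_eq]
      simp
    have hB : middle_element_alt d =
        PySem.List.slice d (some (((d.length / 2 : Nat) : Int) - 1))
          (some (((d.length / 2 : Nat) : Int) + 1)) := by
      unfold middle_element_alt
      simp only [hf]
      rw [if_pos hm0]
    rcases Nat.eq_zero_or_pos d.length with h0 | hpos
    · have hd : d = [] := List.eq_nil_of_length_eq_zero h0
      subst hd
      decide
    · have h2 : 1 ≤ d.length / 2 := by omega
      have hlt : d.length / 2 < d.length := by omega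
      have e1 : ((d.length / 2 : Nat) : Int) = ((d.length / 2 - 1 : Nat) : Int) + 1 := by
        rw [Nat.cast_sub h2]; push_cast; ring
      rw [hA, hB, pvSel_lt _ _ _ (by omega)]
      rw [pvPick_eq d (d.length / 2) hlt]
      rw [e1, pvPick_eq d (d.length / 2 - 1) (by omega)]
      have e2 : ((d.length / 2 - 1 : Nat) : Int) + 1 - 1 = ((d.length / 2 - 1 : Nat) : Int) := by
        ring
      have e3 : ((d.length / 2 - 1 : Nat) : Int) + 1 + 1 = ((d.length / 2 + 1 : Nat) : Int) := by
        rw [Nat.cast_sub h2]; push_cast; ring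
      rw [e2, e3, PySem.List.slice_natCast]
      have e5 : d.length / 2 + 1 - (d.length / 2 - 1) = 2 := by omega
      rw [e5, drop_take_two d (d.length / 2 - 1) (by omega)]
      have e4 : d.length / 2 - 1 + 1 = d.length / 2 := by omega
      simp [e4]
  · -- odd length
    have hm1 : ¬ PySem.Int.mod (d.length : Int) 2 = 0 := by
      rw [hm]
      omega
    have hA : middle_element d = pvSel d ((d.length / 2 : Nat) : Int) 0 := by
      unfold middle_element dictionary_length
      simp only [hm1, hf, PySem.List.pyGet?, PySem.List.pyIdx?]
      rw [fold_eq]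
      simp
    have hB : middle_element_alt d =
        PySem.List.slice d (some (((d.length / 2 : Nat) : Int) - 1))
          (some ((d.length / 2 : Nat) : Int)) := by
      unfold middle_element_alt
      simp only [hf]
      rw [if_neg hm1]
    rw [hA, hB, pvSel_right_nonpos _ _ _ le_rfl]
    rcases Nat.eq_zero_or_pos (d.length / 2) with h0 | hpos
    · -- length 1 (odd, half = 0)
      have hlen : d.length = 1 := by omega
      rcases d with _ | ⟨x, xs⟩
      · simp at hlen
      · have hxs : xs = [] := by simpa using hlen
        subst hxs
        rw [h0]
        simp [pvPick, PySem.List.slice, PySem.List.clampIdx]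
    · have h2 : 1 ≤ d.length / 2 := hpos
      have hlt : d.length / 2 - 1 < d.length := by omega
      have e1 : ((d.length / 2 : Nat) : Int) = ((d.length / 2 - 1 : Nat) : Int) + 1 := by
        rw [Nat.cast_sub h2]; push_cast; ring
      rw [e1, pvPick_eq d (d.length / 2 - 1) hlt]
      have e2 : ((d.length / 2 - 1 : Nat) : Int) + 1 - 1 = ((d.length / 2 - 1 : Nat) : Int) := by
        ring
      have e3 : ((d.length / 2 - 1 : Nat) : Int) + 1 = ((d.length / 2 - 1 + 1 : Nat) : Int) := by
        push_cast; ring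
      rw [e2, e3, PySem.List.slice_natCast]
      have e5 : d.length / 2 - 1 + 1 - (d.length / 2 - 1) = 1 := by omega
      rw [e5, drop_take_one d (d.length / 2 - 1) hlt]
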